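-- pv_equiv track=rewrite | github.com/cpprefjp/stats_contribution | stats_contribution.py | diff_commit_set
-- ===== SOURCE A (Python) =====
-- def diff_commit_set(commit_log_set: set[str], stats_commit_set: set[str]) -> set[str]:
--     diff = commit_log_set - stats_commit_set
--     if len(diff) > 0:
--         remove_commit_set: set[str] = set()
--         for commit in diff:
--             for stats_commit in stats_commit_set:
--                 if stats_commit.startswith(commit):
--                     remove_commit_set.add(commit)
--                     break
--         for commit in remove_commit_set:
--             diff.remove(commit)
--     return diff
-- ===== SOURCE B (Python) =====
-- def diff_commit_set(commit_log_set: set[str], stats_commit_set: set[str]) -> set[str]: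
--     # Index every prefix of every stats commit once; then one O(1) lookup per commit.
--     prefixes: set[str] = set()
--     for s in stats_commit_set:
--         for i in range(len(s) + 1):
--             prefixes.add(s[:i])
--     return {c for c in commit_log_set if c not in prefixes}
-- ===== Notes on version B (the rewrite author's own statement) =====
-- stated objective: faster
-- what changed: Instead of scanning all stats commits for each diff commit with startswith, B builds a hash set of all prefixes of the stats commits once and keeps exactly the commits not in that set, in a single filtering pass.
import Mathlib
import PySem

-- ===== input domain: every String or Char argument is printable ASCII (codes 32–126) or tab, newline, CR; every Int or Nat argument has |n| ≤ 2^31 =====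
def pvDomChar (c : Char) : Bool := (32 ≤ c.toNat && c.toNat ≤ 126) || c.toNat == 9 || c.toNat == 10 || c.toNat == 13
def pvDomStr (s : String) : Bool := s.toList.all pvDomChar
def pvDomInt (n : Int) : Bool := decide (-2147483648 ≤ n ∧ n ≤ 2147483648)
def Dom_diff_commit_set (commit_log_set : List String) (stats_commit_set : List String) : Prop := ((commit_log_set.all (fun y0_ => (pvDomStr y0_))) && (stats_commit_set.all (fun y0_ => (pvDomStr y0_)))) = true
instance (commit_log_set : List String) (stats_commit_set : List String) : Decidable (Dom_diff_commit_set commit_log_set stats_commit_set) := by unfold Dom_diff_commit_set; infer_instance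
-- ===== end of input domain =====

-- B replaces A's per-commit scan over all the stats commits by a hash set of all prefixes of
-- the stats commits built once, then a single filtering pass over the commits (faster).
-- Both Pythons take and return sets; the ports use the distinct-element list encoding.

-- ===== PORT A =====
-- literal port: diff = commit_log_set - stats_commit_set; collect into remove_commit_set the
-- diff commits some stats commit starts with (the for/if/break loop adds a commit iff SOME
-- stats commit matches, which is List.any); then remove each collected commit from diff
-- (diff.remove never raises here since remove_commit_set ⊆ diff, so Set.discard is exact).
def diff_commit_set (commit_log_set : List String) (stats_commit_set : List String) : List String :=
  let diff := PySem.Set.diff commit_log_set stats_commit_set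
  if diff.length > 0 then
    let remove_commit_set : PySem.Set String :=
      diff.foldl (fun r commit =>
        if stats_commit_set.any (fun stats_commit => PySem.Str.startswith stats_commit commit)
        then PySem.Set.add r commit else r) PySem.Set.empty
    remove_commit_set.foldl (fun d commit => PySem.Set.discard d commit) diff
  else diff

-- ===== PORT B =====
def diff_commit_set_alt (commit_log_set : List String) (stats_commit_set : List String) : List String :=
  let prefixes : PySem.Set String :=
    stats_commit_set.foldl (fun p s =>
      (PySem.List.pyRange 0 (PySem.Str.len s + 1) 1).foldl
        (fun p i => PySem.Set.add p (PySem.Str.slice s none (some i))) p) PySem.Set.empty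
  commit_log_set.foldl (fun out c =>
    if PySem.Set.contains prefixes c then out else PySem.Set.add out c) PySem.Set.empty

-- ===== PRECONDITION & SPEC =====
-- Both parameters are Python sets; Pre_ only states the set encoding's invariant
-- (distinct elements), so it excludes no actual Python input.
def Pre_diff_commit_set (commit_log_set : List String) (stats_commit_set : List String) : Prop :=
  commit_log_set.Nodup ∧ stats_commit_set.Nodup
instance (commit_log_set : List String) (stats_commit_set : List String) : Decidable (Pre_diff_commit_set commit_log_set stats_commit_set) := by unfold Pre_diff_commit_set; infer_instance

def pvWitness_diff_commit_set : List String × List String :=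
  (["ab", "zz", "abcdef"], ["abcdef", "qq"])

def Spec_diff_commit_set (commit_log_set : List String) (stats_commit_set : List String) (out : List String) : Prop := out = diff_commit_set_alt commit_log_set stats_commit_set
instance (commit_log_set : List String) (stats_commit_set : List String) (out : List String) : Decidable (Spec_diff_commit_set commit_log_set stats_commit_set out) := by unfold Spec_diff_commit_set; infer_instance

-- ===== CLAIM (what is proved, stated in full; the proofs are below) =====
def Claim_equal_diff_commit_set : Prop := ∀ (commit_log_set : List String) (stats_commit_set : List String), Dom_diff_commit_set commit_log_set stats_commit_set → Pre_diff_commit_set commit_log_set stats_commit_set → Spec_diff_commit_set commit_log_set stats_commit_set (diff_commit_set commit_log_set stats_commit_set)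

-- ===== LEMMAS AND PROOFS =====

-- A's remove-set collection loop: membership
lemma mem_collect (p : String → Bool) (l : List String) (r : PySem.Set String) (y : String) :
    y ∈ l.foldl (fun r c => if p c then PySem.Set.add r c else r) r ↔
      y ∈ r ∨ (y ∈ l ∧ p y) := by
  induction l generalizing r with
  | nil => simp
  | cons c l ih =>
    simp only [List.foldl_cons]
    by_cases h : p c = true
    · rw [if_pos h, ih]
      simp only [PySem.Set.mem_add, List.mem_cons]
      constructor
      · rintro ((hy | rfl) | hy)
        · exact Or.inl hy
        · exact Or.inr ⟨Or.inl rfl, h⟩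
        · exact Or.inr ⟨Or.inr hy.1, hy.2⟩
      · rintro (hy | ⟨(rfl | hy), ha⟩)
        · exact Or.inl (Or.inl hy)
        · exact Or.inl (Or.inr rfl)
        · exact Or.inr ⟨hy, ha⟩
    · rw [if_neg h, ih]
      simp only [List.mem_cons]
      constructor
      · rintro (hy | hy)
        · exact Or.inl hy
        · exact Or.inr ⟨Or.inr hy.1, hy.2⟩
      · rintro (hy | ⟨(rfl | hy), ha⟩)
        · exact Or.inl hy
        · exact (h ha).elim
        · exact Or.inr ⟨hy, ha⟩

-- A's removal loop: folding discard over R filters out the members of R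
lemma foldl_discard (R : List String) (d : List String) :
    R.foldl (fun d c => PySem.Set.discard d c) d = d.filter (fun y => !decide (y ∈ R)) := by
  induction R generalizing d with
  | nil => simp
  | cons c R ih =>
    rw [List.foldl_cons, ih]
    simp only [PySem.Set.discard]
    rw [List.filter_filter]
    apply List.filter_congr
    intro y _
    by_cases h1 : y = c <;> by_cases h2 : y ∈ R <;> simp [h1, h2]

-- A's result is one filter over its diff list
lemma portA_filter (cls sts : List String) :
    diff_commit_set cls sts =
      (PySem.Set.diff cls sts).filter
        (fun c => !(sts.any (fun s => PySem.Str.startswith s c))) := by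
  simp only [diff_commit_set]
  split_ifs with h
  · rw [foldl_discard]
    apply List.filter_congr
    intro y hy
    set R := List.foldl (fun r commit =>
        if sts.any (fun stats_commit => PySem.Str.startswith stats_commit commit)
        then PySem.Set.add r commit else r) PySem.Set.empty (PySem.Set.diff cls sts) with hR
    have hmem : y ∈ R ↔ (sts.any (fun s => PySem.Str.startswith s y)) = true := by
      rw [hR, mem_collect]
      simp [PySem.Set.empty, hy]
    rcases hp : sts.any (fun s => PySem.Str.startswith s y) with _ | _
    · have hn : y ∉ R := fun hm => Bool.false_ne_true (hp ▸ hmem.mp hm)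
      rw [decide_eq_false hn]
    · rw [decide_eq_true (hmem.mpr hp)]
  · have hnil : PySem.Set.diff cls sts = [] := by
      rcases hd : PySem.Set.diff cls sts with _ | _
      · rfl
      · exfalso; rw [hd] at h; simp at h
    simp [hnil]

-- B's prefix set: membership = being a prefix of some stats commit
lemma mem_prefixes (sts : List String) (p : PySem.Set String) (y : String) :
    y ∈ sts.foldl (fun p s =>
        (PySem.List.pyRange 0 (PySem.Str.len s + 1) 1).foldl
          (fun p i => PySem.Set.add p (PySem.Str.slice s none (some i))) p) p ↔
      y ∈ p ∨ ∃ s ∈ sts, y.toList <+: s.toList := by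
  induction sts generalizing p with
  | nil => simp
  | cons s sts ih =>
    simp only [List.foldl_cons, ih, PySem.Set.mem_foldl_add, List.mem_cons]
    constructor
    · rintro (hp | hy)
      · rcases hp with hp | ⟨i, hi, rfl⟩
        · exact Or.inl hp
        · refine Or.inr ⟨s, Or.inl rfl, ?_⟩
          rw [PySem.List.mem_pyRange_one] at hi
          rw [PySem.Str.toList_slice, PySem.Chars.slice_eq_listSlice,
            PySem.List.slice_to _ hi.1]
          exact List.take_prefix _ _
      · exact Or.inr ⟨hy.choose, Or.inr hy.choose_spec.1, hy.choose_spec.2⟩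
    · rintro (hp | ⟨t, (rfl | ht), hpre⟩)
      · exact Or.inl (Or.inl hp)
      · refine Or.inl (Or.inr ⟨(y.toList.length : Int), ?_, ?_⟩)
        · rw [PySem.List.mem_pyRange_one, PySem.Str.len_eq]
          have := hpre.length_le
          omega
        · have h2 : (PySem.Str.slice t none (some (y.toList.length : Int))).toList = y.toList := by
            rw [PySem.Str.toList_slice, PySem.Chars.slice_eq_listSlice,
              PySem.List.slice_to _ (by positivity)]
            simpa using (List.prefix_iff_eq_take.mp hpre).symm
          exact (String.toList_inj.mp h2).symm
      · exact Or.inr ⟨t, ht, hpre⟩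

-- B's output loop builds acc ++ (the commits not in the prefix set), given Nodup and freshness
lemma portB_loop (P : PySem.Set String) (cls : List String) (acc : List String)
    (hnd : cls.Nodup) (hfresh : ∀ c ∈ cls, c ∉ acc) :
    cls.foldl (fun out c => if PySem.Set.contains P c then out else PySem.Set.add out c) acc =
      acc ++ cls.filter (fun c => !PySem.Set.contains P c) := by
  induction cls generalizing acc with
  | nil => simp
  | cons c cls ih =>
    simp only [List.foldl_cons]
    rcases List.nodup_cons.mp hnd with ⟨hc, hnd'⟩
    by_cases h : PySem.Set.contains P c = true
    · rw [if_pos h, ih _ hnd' (fun c' hc' => hfresh c' (List.mem_cons_of_mem _ hc'))]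
      have hcP : c ∈ P := by rwa [PySem.Set.contains_iff] at h
      simp [hcP]
    · rw [if_neg h, PySem.Set.add_of_not_mem (hfresh c (List.mem_cons_self ..)),
        ih _ hnd' ?_]
      · have hcP : c ∉ P := fun hm => h ((PySem.Set.contains_iff _ _).mpr hm)
        simp [hcP]
      · intro c' hc'
        simp only [List.mem_append, List.mem_singleton, not_or]
        exact ⟨hfresh c' (List.mem_cons_of_mem _ hc'), fun he => hc (he ▸ hc')⟩

-- the common characterisation, B side
lemma portB_filter (cls sts : List String) (hnd : cls.Nodup) :
    diff_commit_set_alt cls sts =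
      cls.filter (fun c => !(sts.any (fun s => PySem.Str.startswith s c))) := by
  simp only [diff_commit_set_alt]
  rw [portB_loop _ _ _ hnd (by simp [PySem.Set.empty])]
  simp only [PySem.Set.empty, List.nil_append]
  apply List.filter_congr
  intro c _
  congr 1
  set P := List.foldl (fun p s =>
      (PySem.List.pyRange 0 (PySem.Str.len s + 1) 1).foldl
        (fun p i => PySem.Set.add p (PySem.Str.slice s none (some i))) p)
      ([] : List String) sts with hP
  rcases hp : sts.any (fun s => PySem.Str.startswith s c) with _ | _
  · have hnm : c ∉ P := by
      rw [hP, mem_prefixes]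
      rintro (h0 | ⟨s, hs, hpre⟩)
      · exact List.not_mem_nil h0
      · have hsw : PySem.Str.startswith s c = true := by
          rw [PySem.Str.startswith_eq]
          exact (PySem.Chars.startswith_iff _ _).mpr hpre
        have h3 : sts.any (fun s => PySem.Str.startswith s c) = true :=
          List.any_eq_true.mpr ⟨s, hs, hsw⟩
        rw [hp] at h3
        exact Bool.false_ne_true h3
    have : PySem.Set.contains P c = false :=
      Bool.eq_false_iff.mpr (fun h => hnm ((PySem.Set.contains_iff _ _).mp h))
    exact this
  · rcases List.any_eq_true.mp hp with ⟨s, hs, hsw⟩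
    have hm : c ∈ P := by
      rw [hP, mem_prefixes]
      exact Or.inr ⟨s, hs, (PySem.Chars.startswith_iff _ _).mp
        (by simpa [PySem.Str.startswith_eq] using hsw)⟩
    exact (PySem.Set.contains_iff _ _).mpr hm

-- every member of stats starts with itself, so A's extra "not in stats" filter is absorbed
lemma filter_absorb (cls sts : List String) :
    (PySem.Set.diff cls sts).filter
        (fun c => !(sts.any (fun s => PySem.Str.startswith s c))) =
      cls.filter (fun c => !(sts.any (fun s => PySem.Str.startswith s c))) := by
  unfold PySem.Set.diff
  rw [List.filter_filter]
  apply List.filter_congr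
  intro c _
  rcases hp : sts.any (fun s => PySem.Str.startswith s c) with _ | _
  · have hcf : PySem.Set.contains sts c = false := by
      rcases hcc : PySem.Set.contains sts c with _ | _
      · rfl
      · exfalso
        have hcm : c ∈ sts := (PySem.Set.contains_iff _ _).mp hcc
        have hself : PySem.Str.startswith c c = true := by
          rw [PySem.Str.startswith_eq]
          exact (PySem.Chars.startswith_iff _ _).mpr (List.prefix_refl _)
        have h3 : sts.any (fun s => PySem.Str.startswith s c) = true :=
          List.any_eq_true.mpr ⟨c, hcm, hself⟩
        rw [hp] at h3
        exact Bool.false_ne_true h3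
    rw [hcf]
    rfl
  · rfl

-- ===== VERDICT (by name: the statement is the Claim_ definition above) =====
theorem diff_commit_set_spec : Claim_equal_diff_commit_set := by
  intro cls sts _ hpre
  unfold Spec_diff_commit_set
  rw [portA_filter, portB_filter cls sts hpre.1, filter_absorb]
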